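-- pv_equiv track=rewrite | github.com/xuzhezhaozhao/TopCoder | 659/D21/FilipTheFrog.py | countReachableIslands
-- ===== SOURCE A (Python) =====
-- def countReachableIslands(positions, L):
--     cur = positions[0]
--     positions = sorted(positions)
--     cur = positions.index(cur)
--     res = 1
--     for i in range(cur - 1, -1, -1):
--         if positions[i + 1] - positions[i] <= L:
--             res += 1
--         else:
--             break
--
--     for i in range(cur + 1, len(positions)):
--         if positions[i] - positions[i-1] <= L:
--             res += 1
--         else:
--             break
--
--     return res
-- ===== SOURCE B (Python) =====
-- def countReachableIslands(positions, L):
--     start = positions[0]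
--     s = sorted(positions)
--     # one forward pass: split the sorted list into maximal clusters (adjacent gap <= L)
--     clusters = []
--     size = 1
--     for prev, cur in zip(s, s[1:]):
--         if cur - prev <= L:
--             size += 1
--         else:
--             clusters.append(size)
--             size = 1
--     clusters.append(size)
--     # locate the cluster containing the start value's first occurrence
--     idx = s.index(start)
--     for c in clusters:
--         if idx < c:
--             return c
--         idx -= c
-- ===== Notes on version B (the rewrite author's own statement) =====
-- stated objective: alternative
-- what changed: A scans outward from the start index in two directions with break; B makes one forward grouping pass that partitions the whole sorted list into maximal clusters (adjacent gap <= L) and then looks up the cluster containing the start value's first-occurrence index.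
import Mathlib
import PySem

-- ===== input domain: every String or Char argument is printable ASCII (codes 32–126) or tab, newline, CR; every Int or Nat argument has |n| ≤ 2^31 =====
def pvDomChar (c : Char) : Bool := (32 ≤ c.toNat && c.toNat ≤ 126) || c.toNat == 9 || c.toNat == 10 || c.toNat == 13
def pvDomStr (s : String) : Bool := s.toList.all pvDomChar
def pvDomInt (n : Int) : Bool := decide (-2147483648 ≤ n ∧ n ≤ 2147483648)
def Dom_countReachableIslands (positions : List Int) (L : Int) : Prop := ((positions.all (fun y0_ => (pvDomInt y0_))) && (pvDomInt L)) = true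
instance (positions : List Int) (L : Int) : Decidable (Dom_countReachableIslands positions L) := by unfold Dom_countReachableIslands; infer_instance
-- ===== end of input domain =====

-- B replaces A's two outward break-scans from the start index by one forward pass that
-- partitions the whole sorted list into maximal clusters, then looks up the start's cluster.

-- ===== PORT A =====
-- left loop of A: for i in range(cur-1, -1, -1) with break; argument = cur (index i+? handled per step)
def aLeft (s : List Int) (L : Int) : Nat → Int
  | 0 => 0
  | i+1 => if PySem.List.pyGetD s ((i : Int) + 1) 0 - PySem.List.pyGetD s (i : Int) 0 ≤ L
           then 1 + aLeft s L i else 0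

-- right loop of A: for i in range(cur+1, len(s)) with break; fuel = number of remaining indices
def aRight (s : List Int) (L : Int) : Nat → Nat → Int
  | 0, _ => 0
  | fuel+1, i => if PySem.List.pyGetD s (i : Int) 0 - PySem.List.pyGetD s ((i : Int) - 1) 0 ≤ L
                 then 1 + aRight s L fuel (i+1) else 0

def countReachableIslands (positions : List Int) (L : Int) : Int :=
  match PySem.List.pyGet? positions 0 with
  | none => 0  -- IndexError on empty input; excluded by Pre_
  | some cur0 =>
    let s := PySem.List.sorted positions (fun x => x) false
    match PySem.List.index? s cur0 with
    | none => 0  -- unreachable: cur0 is a member of s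
    | some cur => 1 + aLeft s L cur + aRight s L (s.length - (cur + 1)) (cur + 1)

-- ===== PORT B =====
-- one step of B's grouping pass over zip(s, s[1:]); state = (finished cluster sizes, current size)
def bStep (L : Int) (st : List Int × Int) (pr : Int × Int) : List Int × Int :=
  if pr.2 - pr.1 ≤ L then (st.1, st.2 + 1) else (st.1 ++ [st.2], 1)

-- B's lookup loop: first cluster with idx < c (idx decremented by the sizes passed)
def bLook : List Int → Int → Int
  | [], _ => 0  -- unreachable in B: the clusters cover every index of s
  | c :: cs, idx => if idx < c then c else bLook cs (idx - c)

def countReachableIslands_alt (positions : List Int) (L : Int) : Int :=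
  match PySem.List.pyGet? positions 0 with
  | none => 0  -- IndexError on empty input; excluded by Pre_
  | some start =>
    let s := PySem.List.sorted positions (fun x => x) false
    let st := (s.zip (PySem.List.slice s (some 1) none)).foldl (bStep L) ([], 1)
    let clusters := st.1 ++ [st.2]
    match PySem.List.index? s start with
    | none => 0  -- unreachable: start is a member of s
    | some idx => bLook clusters (idx : Int)

-- ===== PRECONDITION & SPEC =====
-- A raises IndexError on the empty list (positions[0]); that is the only exception.
def Pre_countReachableIslands (positions : List Int) (L : Int) : Prop := positions ≠ []
instance (positions : List Int) (L : Int) : Decidable (Pre_countReachableIslands positions L) := by unfold Pre_countReachableIslands; infer_instance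

def pvWitness_countReachableIslands : List Int × Int := ([4, 7, 1, 7, 2], 2)

def Spec_countReachableIslands (positions : List Int) (L : Int) (out : Int) : Prop := out = countReachableIslands_alt positions L
instance (positions : List Int) (L : Int) (out : Int) : Decidable (Spec_countReachableIslands positions L out) := by unfold Spec_countReachableIslands; infer_instance

-- ===== CLAIM (what is proved, stated in full; the proofs are below) =====
def Claim_equal_countReachableIslands : Prop := ∀ (positions : List Int) (L : Int), Dom_countReachableIslands positions L → Pre_countReachableIslands positions L → Spec_countReachableIslands positions L (countReachableIslands positions L)

-- ===== LEMMAS AND PROOFS =====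

-- recursive characterisation of B's cluster-size list on a nonempty list
def clustersOf (L : Int) : List Int → List Int
  | [] => []
  | [_] => [1]
  | a :: b :: t =>
    if b - a ≤ L then
      match clustersOf L (b :: t) with
      | [] => []
      | h :: tl => (h + 1) :: tl
    else 1 :: clustersOf L (b :: t)

def bump (d : Int) : List Int → List Int
  | [] => []
  | h :: t => (h + d) :: t

theorem clustersOf_ne_nil (L : Int) (a : Int) (t : List Int) : clustersOf L (a :: t) ≠ [] := by
  induction t generalizing a with
  | nil => simp [clustersOf]
  | cons b t ih =>
    simp only [clustersOf]
    split_ifs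
    · cases h : clustersOf L (b :: t) with
      | nil => exact absurd h (ih b)
      | cons h' tl => simp
    · simp

theorem bump_bump (d e : Int) (xs : List Int) : bump d (bump e xs) = bump (d + e) xs := by
  cases xs <;> (simp [bump]; try ring)

theorem bump_zero (xs : List Int) : bump 0 xs = xs := by
  cases xs <;> simp [bump]

-- B's fold, finalized, builds exactly acc ++ (clustersOf with the first cluster enlarged by size-1)
theorem fold_clusters (L : Int) (rest : List Int) : ∀ (a : Int) (acc : List Int) (size : Int),
    (let st := ((a :: rest).zip rest).foldl (bStep L) (acc, size); st.1 ++ [st.2])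
      = acc ++ bump (size - 1) (clustersOf L (a :: rest)) := by
  induction rest with
  | nil => intro a acc size; simp [clustersOf, bump]
  | cons b t ih =>
    intro a acc size
    simp only [List.zip_cons_cons, List.foldl_cons, bStep]
    by_cases hg : b - a ≤ L
    · simp only [hg, if_pos]
      have := ih b acc (size + 1)
      simp only at this ⊢
      rw [this]
      have hcl : clustersOf L (a :: b :: t) = bump 1 (clustersOf L (b :: t)) := by
        simp only [clustersOf, if_pos hg]
        cases h : clustersOf L (b :: t) with
        | nil => exact absurd h (clustersOf_ne_nil L b t)
        | cons h' tl => simp [bump]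
      rw [hcl, bump_bump]
      ring_nf
    · simp only [hg, if_false]
      have := ih b (acc ++ [size]) 1
      simp only at this ⊢
      rw [this]
      have hcl : clustersOf L (a :: b :: t) = 1 :: clustersOf L (b :: t) := by
        simp [clustersOf, hg]
      rw [hcl]
      simp
      cases h : clustersOf L (b :: t) with
      | nil => exact absurd h (clustersOf_ne_nil L b t)
      | cons h' tl => simp [bump]

-- unfold aLeft / aRight to List.getD with Nat indices
theorem aLeft_succ (s : List Int) (L : Int) (i : Nat) :
    aLeft s L (i+1) = if s.getD (i+1) 0 - s.getD i 0 ≤ L then 1 + aLeft s L i else 0 := by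
  rw [aLeft, show ((i : Int) + 1) = ((i + 1 : Nat) : Int) by push_cast; ring]
  simp only [PySem.List.pyGetD_natCast]

theorem aRight_succ (s : List Int) (L : Int) (fuel i : Nat) (hi : 1 ≤ i) :
    aRight s L (fuel+1) i = if s.getD i 0 - s.getD (i-1) 0 ≤ L then 1 + aRight s L fuel (i+1) else 0 := by
  have h1 : ((i : Int) - 1) = ((i - 1 : Nat) : Int) := by omega
  simp [aRight, h1]

theorem aRight_shift (L : Int) (a : Int) (rest : List Int) (fuel : Nat) :
    ∀ i : Nat, 1 ≤ i → aRight (a :: rest) L fuel (i+1) = aRight rest L fuel i := by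
  induction fuel with
  | zero => intro i _; simp [aRight]
  | succ fuel ih =>
    intro i hi
    rw [aRight_succ _ _ _ _ (by omega), aRight_succ _ _ _ _ hi]
    have e1 : (a :: rest).getD (i+1) 0 = rest.getD i 0 := by simp
    have e2 : (a :: rest).getD (i+1-1) 0 = rest.getD (i-1) 0 := by
      have : i + 1 - 1 = (i - 1) + 1 := by omega
      rw [this]; simp
    rw [e1, e2, ih (i+1) (by omega)]

theorem aLeft_le (s : List Int) (L : Int) (idx : Nat) : 0 ≤ aLeft s L idx ∧ aLeft s L idx ≤ (idx : Int) := by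
  induction idx with
  | zero => simp [aLeft]
  | succ i ih =>
    rw [aLeft_succ]
    split_ifs
    · push_cast; omega
    · exact ⟨le_refl 0, by positivity⟩

theorem aLeft_shift (L : Int) (a : Int) (rest : List Int) (idx : Nat) :
    aLeft (a :: rest) L (idx+1)
      = aLeft rest L idx
        + (if aLeft rest L idx = (idx : Int) ∧ rest.getD 0 0 - a ≤ L then 1 else 0) := by
  induction idx with
  | zero =>
    rw [aLeft_succ]
    simp [aLeft]
  | succ i ih =>
    rw [aLeft_succ, aLeft_succ rest L i]
    have e1 : (a :: rest).getD (i+1+1) 0 = rest.getD (i+1) 0 := by simp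
    have e2 : (a :: rest).getD (i+1) 0 = rest.getD i 0 := by simp
    rw [e1, e2, ih]
    have hb := aLeft_le rest L i
    by_cases hg : rest.getD (i+1) 0 - rest.getD i 0 ≤ L
    · simp only [hg, if_true]
      have hcond : ((1 : Int) + aLeft rest L i = ((i + 1 : Nat) : Int)) ↔ aLeft rest L i = (i : Int) := by
        push_cast; omega
      simp only [hcond]
      ring
    · simp only [hg, if_false]
      have h0 : ¬ ((0 : Int) = ((i + 1 : Nat) : Int) ∧ rest.getD 0 0 - a ≤ L) := by
        push_cast; rintro ⟨h, -⟩; omega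
      rw [if_neg h0]
      ring

theorem clustersOf_head_pos (L : Int) (a : Int) (t : List Int) :
    1 ≤ (clustersOf L (a :: t)).headD 0 := by
  induction t generalizing a with
  | nil => simp [clustersOf]
  | cons b t ih =>
    simp only [clustersOf]
    split_ifs
    · cases h : clustersOf L (b :: t) with
      | nil => exact absurd h (clustersOf_ne_nil L b t)
      | cons h' tl =>
        have := ih b; rw [h] at this; simp at this ⊢; omega
    · simp

-- the head cluster size is 1 + the right scan from index 1
theorem head_clusters (L : Int) (a : Int) (t : List Int) :
    (clustersOf L (a :: t)).headD 0 = 1 + aRight (a :: t) L t.length 1 := by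
  induction t generalizing a with
  | nil => simp [clustersOf, aRight]
  | cons b t ih =>
    simp only [List.length_cons]
    rw [aRight_succ _ _ _ _ (by omega)]
    have e1 : (a :: b :: t).getD 1 0 = b := by simp
    have e2 : (a :: b :: t).getD 0 0 = a := by simp
    rw [e1, e2]
    simp only [clustersOf]
    by_cases hg : b - a ≤ L
    · simp only [hg, if_pos]
      cases h : clustersOf L (b :: t) with
      | nil => exact absurd h (clustersOf_ne_nil L b t)
      | cons h' tl =>
        have hib := ih b
        rw [h] at hib
        simp only [List.headD_cons] at hib
        rw [aRight_shift L a (b :: t) t.length 1 (by omega)]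
        dsimp only
        simp only [List.headD_cons]
        omega
    · simp [hg]

-- the left scan from idx reaches the bottom iff idx lies in the first cluster
theorem aLeft_full_iff (L : Int) : ∀ (rest : List Int) (idx : Nat), idx < rest.length →
    (aLeft rest L idx = (idx : Int) ↔ (idx : Int) < (clustersOf L rest).headD 0) := by
  intro rest
  induction rest with
  | nil => intro idx h; simp at h
  | cons c rest ih =>
    intro idx hlen
    cases idx with
    | zero =>
      simp only [aLeft, Nat.cast_zero]
      have := clustersOf_head_pos L c rest
      constructor
      · intro _; omega
      · intro _; trivial
    | succ i =>
      cases rest with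
      | nil => simp at hlen
      | cons d t =>
        rw [aLeft_shift]
        have e0 : (d :: t).getD 0 0 = d := by simp
        rw [e0]
        have hb := aLeft_le (d :: t) L i
        have ihh := ih i (by simpa using Nat.lt_of_succ_lt_succ hlen)
        simp only [clustersOf]
        by_cases hg : d - c ≤ L
        · simp only [hg, and_true, if_true]
          cases h : clustersOf L (d :: t) with
          | nil => exact absurd h (clustersOf_ne_nil L d t)
          | cons h' tl =>
            rw [h] at ihh
            simp only [List.headD_cons] at ihh ⊢
            by_cases he : aLeft (d :: t) L i = (i : Int)
            · simp only [he, if_pos]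
              push_cast at ihh ⊢
              omega
            · simp only [he, if_false]
              push_cast at ihh ⊢
              omega
        · simp only [hg, and_false, if_false, add_zero]
          have hpos := clustersOf_head_pos L d t
          cases h : clustersOf L (d :: t) with
          | nil => exact absurd h (clustersOf_ne_nil L d t)
          | cons h' tl =>
            rw [h] at hpos
            simp only [List.headD_cons] at hpos ⊢
            push_cast
            constructor <;> intro hx <;> omega

-- main bridge: B's cluster lookup equals A's 1 + left scan + right scan
theorem main_bridge (L : Int) : ∀ (s : List Int), s ≠ [] → ∀ idx : Nat, idx < s.length →
    bLook (clustersOf L s) (idx : Int)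
      = 1 + aLeft s L idx + aRight s L (s.length - (idx + 1)) (idx + 1) := by
  intro s
  induction s with
  | nil => intro h; exact absurd rfl h
  | cons a rest ih =>
    intro _ idx hlen
    cases idx with
    | zero =>
      cases h : clustersOf L (a :: rest) with
      | nil => exact absurd h (clustersOf_ne_nil L a rest)
      | cons h' tl =>
        have hpos := clustersOf_head_pos L a rest
        have hhead := head_clusters L a rest
        rw [h] at hpos hhead
        simp only [List.headD_cons] at hpos hhead
        simp only [bLook, Nat.cast_zero]
        rw [if_pos (by omega)]
        simp only [aLeft]
        have hl : (a :: rest).length - (0 + 1) = rest.length := by simp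
        rw [hl]
        simp only [Nat.zero_add]
        omega
    | succ i =>
      cases rest with
      | nil => simp at hlen
      | cons b t =>
        have hlen' : i < (b :: t).length := by simpa using Nat.lt_of_succ_lt_succ hlen
        have IH := ih (by simp) i hlen'
        have hshift := aRight_shift L a (b :: t) ((b :: t).length - (i + 1)) (i + 1) (by omega)
        have hflen : (a :: b :: t).length - (i + 1 + 1) = (b :: t).length - (i + 1) := by simp
        rw [aLeft_shift]
        have e0 : (b :: t).getD 0 0 = b := by simp
        rw [e0, hflen, hshift]
        have hiff := aLeft_full_iff L (b :: t) i hlen'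
        have hb := aLeft_le (b :: t) L i
        simp only [clustersOf]
        by_cases hg : b - a ≤ L
        · simp only [hg, and_true, if_true]
          cases h : clustersOf L (b :: t) with
          | nil => exact absurd h (clustersOf_ne_nil L b t)
          | cons h' tl =>
            rw [h] at IH hiff
            simp only [List.headD_cons] at hiff
            simp only [bLook] at IH ⊢
            by_cases hin : (i : Int) < h'
            · rw [if_pos (by push_cast; omega)]
              rw [if_pos hin] at IH
              have he : aLeft (b :: t) L i = (i : Int) := hiff.mpr hin
              rw [if_pos he]
              omega
            · rw [if_neg (by push_cast; omega)]
              rw [if_neg hin] at IH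
              have hc : ((i + 1 : Nat) : Int) - (h' + 1) = (i : Int) - h' := by push_cast; ring
              rw [hc, IH]
              have hne : ¬ aLeft (b :: t) L i = (i : Int) := fun he => hin (hiff.mp he)
              rw [if_neg hne]
              ring
        · simp only [hg, and_false, if_false, add_zero]
          simp only [bLook]
          rw [if_neg (by push_cast; omega)]
          have hc : ((i + 1 : Nat) : Int) - 1 = (i : Int) := by push_cast; ring
          rw [hc, IH]

-- ===== VERDICT (by name: the statement is the Claim_ definition above) =====
theorem countReachableIslands_spec : Claim_equal_countReachableIslands := by
  intro positions L _dom hpre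
  unfold Spec_countReachableIslands countReachableIslands countReachableIslands_alt
  cases positions with
  | nil => exact absurd rfl hpre
  | cons a ps =>
    have hget : PySem.List.pyGet? (a :: ps) 0 = some a := by
      simp [PySem.List.pyGet?, PySem.List.pyIdx?]
    rw [hget]
    dsimp only
    have hmem : a ∈ PySem.List.sorted (a :: ps) (fun x => x) false := by
      rw [PySem.List.mem_sorted]; simp
    have hidx : ∃ k, PySem.List.index? (PySem.List.sorted (a :: ps) (fun x => x) false) a = some k :=
      Option.isSome_iff_exists.mp ((PySem.List.index?_isSome_iff _ _).mpr hmem)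
    obtain ⟨k, hk⟩ := hidx
    obtain ⟨hklt, -, -⟩ := PySem.List.getElem_of_index?_eq_some hk
    rw [hk]
    dsimp only
    cases hsc : PySem.List.sorted (a :: ps) (fun x => x) false with
    | nil => rw [hsc] at hmem; simp at hmem
    | cons x xs =>
      rw [hsc] at hklt
      have hslice : PySem.List.slice (x :: xs) (some 1) none = xs := by
        simpa using PySem.List.slice_from_one (xs := x :: xs)
      rw [hslice]
      have hfold := fold_clusters L xs x [] 1
      simp only at hfold
      rw [show (1 : Int) - 1 = 0 from rfl, bump_zero] at hfold
      rw [hfold]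
      simp only [List.nil_append]
      exact (main_bridge L (x :: xs) (by simp) k hklt).symm
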